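-- pv_equiv track=rewrite | github.com/nju-websoft/SPARQA | code/grounding/ranking/path_match_vocab.py | path_same_preffix
-- ===== SOURCE A (Python) =====
-- def path_same_preffix(path):
--     ports = path.split("\t")
--     options = set()
--     options.add("base")
--     options.add("people")
--     for port in ports:
--         if port.split(".")[0] != "base" and port.split(".")[0] != "people":
--             options.add(port.split(".")[0])
--             break
--     # 不应当同时有people,base,其他的；可以people+其他或者base+其他
--     all_preffix = set()
--     for port in ports:
--         all_preffix.add(port.split(".")[0])
--     if len(all_preffix) >= 3:
--         return 0
--     for port in ports:
--         if port.split(".")[0] not in options: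
--             return 0
--     return 1
-- ===== SOURCE B (Python) =====
-- def path_same_preffix(path):
--     prefixes = {port.split(".")[0] for port in path.split("\t")}
--     others = prefixes - {"base", "people"}
--     return 0 if len(others) >= 2 or len(prefixes) >= 3 else 1
-- ===== Notes on version B (the rewrite author's own statement) =====
-- stated objective: simpler
-- what changed: Replaces A's three loops (first-other search with break, separate prefix-set-building loop, per-port membership-check loop) with a single set comprehension of prefixes plus a set difference, deciding the result by two cardinality tests.
import Mathlib
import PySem

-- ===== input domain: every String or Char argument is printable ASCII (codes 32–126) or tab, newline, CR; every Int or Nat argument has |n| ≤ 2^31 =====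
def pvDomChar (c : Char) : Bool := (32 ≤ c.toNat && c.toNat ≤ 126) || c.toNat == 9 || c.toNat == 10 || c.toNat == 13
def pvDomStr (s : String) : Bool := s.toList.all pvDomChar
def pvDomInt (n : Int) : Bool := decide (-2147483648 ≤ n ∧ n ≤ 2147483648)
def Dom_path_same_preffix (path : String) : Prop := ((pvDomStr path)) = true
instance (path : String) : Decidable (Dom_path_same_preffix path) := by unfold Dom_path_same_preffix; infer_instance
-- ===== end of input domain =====

-- B replaces A's three loops (first-other search with break, set-building loop, membership
-- check loop) with one set comprehension plus set difference; objective: simpler.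

-- ===== PORT A =====
-- port.split(".")[0]; split? with the nonempty separator "." always returns `some` of a
-- nonempty list, so getD/headD are never taken (exact).
def pvPref (p : String) : String := ((PySem.Str.split? p ".").getD []).headD ""

-- the first for-loop of A: add the first non-base/people prefix to options, then break
def pvAddFirstOther : List String → PySem.Set String → PySem.Set String
  | [], opts => opts
  | p :: rest, opts =>
    if pvPref p ≠ "base" ∧ pvPref p ≠ "people" then PySem.Set.add opts (pvPref p)
    else pvAddFirstOther rest opts

-- the last for-loop of A: return 0 on the first prefix not in options, else fall through to 1
def pvCheckLoop : List String → PySem.Set String → Int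
  | [], _ => 1
  | p :: rest, opts =>
    if ¬ (PySem.Set.contains opts (pvPref p) = true) then 0 else pvCheckLoop rest opts

def path_same_preffix (path : String) : Int :=
  let ports := (PySem.Str.split? path "\t").getD []   -- separator nonempty: always `some`
  let options := PySem.Set.add (PySem.Set.add PySem.Set.empty "base") "people"
  let options := pvAddFirstOther ports options
  let allPreffix := ports.foldl (fun s p => PySem.Set.add s (pvPref p)) PySem.Set.empty
  if 3 ≤ PySem.Set.len allPreffix then 0
  else pvCheckLoop ports options

-- ===== PORT B =====
def path_same_preffix_alt (path : String) : Int :=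
  let prefixes := PySem.Set.ofList (((PySem.Str.split? path "\t").getD []).map pvPref)
  let others := PySem.Set.diff prefixes (PySem.Set.ofList ["base", "people"])
  if 2 ≤ PySem.Set.len others ∨ 3 ≤ PySem.Set.len prefixes then 0 else 1

-- ===== PRECONDITION & SPEC =====
def Spec_path_same_preffix (path : String) (out : Int) : Prop := out = path_same_preffix_alt path
instance (path : String) (out : Int) : Decidable (Spec_path_same_preffix path out) := by unfold Spec_path_same_preffix; infer_instance

-- ===== CLAIM (what is proved, stated in full; the proofs are below) =====
def Claim_equal_path_same_preffix : Prop := ∀ (path : String), Dom_path_same_preffix path → Spec_path_same_preffix path (path_same_preffix path)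

-- ===== LEMMAS AND PROOFS =====

-- A's first loop is: add the prefix of the first port whose prefix is neither "base" nor "people" (if any)
theorem pvAddFirstOther_eq (ports : List String) (opts : PySem.Set String) :
    pvAddFirstOther ports opts =
      match ports.find? (fun p => decide (pvPref p ≠ "base" ∧ pvPref p ≠ "people")) with
      | some p => PySem.Set.add opts (pvPref p)
      | none => opts := by
  induction ports with
  | nil => rfl
  | cons p rest ih =>
    by_cases h : pvPref p ≠ "base" ∧ pvPref p ≠ "people" <;>
      simp [pvAddFirstOther, List.find?, h, ih]

-- A's last loop returns 1 iff every prefix is in options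
theorem pvCheckLoop_eq (ports : List String) (opts : PySem.Set String) :
    pvCheckLoop ports opts = if ∀ p ∈ ports, pvPref p ∈ opts then 1 else 0 := by
  induction ports with
  | nil => simp [pvCheckLoop]
  | cons p rest ih =>
    simp only [pvCheckLoop, ih, List.forall_mem_cons]
    by_cases h : pvPref p ∈ opts
    · have hc : ¬ ¬ PySem.Set.contains opts (pvPref p) = true :=
        not_not_intro ((PySem.Set.contains_iff _ _).mpr h)
      rw [if_neg hc]
      by_cases h2 : ∀ q ∈ rest, pvPref q ∈ opts
      · rw [if_pos h2, if_pos ⟨h, h2⟩]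
      · rw [if_neg h2, if_neg (fun hh => h2 hh.2)]
    · have hc : ¬ PySem.Set.contains opts (pvPref p) = true :=
        fun hh => h ((PySem.Set.contains_iff _ _).mp hh)
      rw [if_pos hc, if_neg (fun hh => h hh.1)]

-- a Nodup list with a member has length ≥ 2 iff it has a second, different member
theorem pvTwoMem {O : List String} (hnd : O.Nodup) {a : String} (ha : a ∈ O) :
    (2 ≤ O.length) ↔ ∃ b ∈ O, b ≠ a := by
  constructor
  · intro hlen
    by_contra hno
    push_neg at hno
    have hsub : O ⊆ [a] := by intro x hx; simp [hno x hx]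
    have := (List.subperm_of_subset hnd hsub).length_le
    simp at this; omega
  · rintro ⟨b, hb, hba⟩
    have hsub : [b, a] ⊆ O := by intro x hx; simp at hx; rcases hx with h | h <;> simp [h, hb, ha]
    have hnd2 : ([b, a] : List String).Nodup := by simp [hba]
    exact (List.subperm_of_subset hnd2 hsub).length_le

-- the common core, with the prefix map abstracted (keeps `pvPref` opaque to unification)
theorem pvCore (f : String → String) (ports : List String) :
    (if 3 ≤ PySem.Set.len (PySem.Set.ofList (ports.map f)) then (0 : Int)
     else if ∀ p ∈ ports, f p ∈
        (match ports.find? (fun p => decide (f p ≠ "base" ∧ f p ≠ "people")) with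
          | some p => PySem.Set.add (PySem.Set.add (PySem.Set.add PySem.Set.empty "base") "people") (f p)
          | none => PySem.Set.add (PySem.Set.add PySem.Set.empty "base") "people") then 1 else 0)
    = (if 2 ≤ PySem.Set.len (PySem.Set.diff (PySem.Set.ofList (ports.map f)) (PySem.Set.ofList ["base", "people"]))
          ∨ 3 ≤ PySem.Set.len (PySem.Set.ofList (ports.map f)) then 0 else 1) := by
  set S := PySem.Set.ofList (ports.map f) with hS
  set O := PySem.Set.diff S (PySem.Set.ofList ["base", "people"]) with hO
  have hlenO : (2 ≤ PySem.Set.len O) ↔ (2 ≤ O.length) := by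
    simp [PySem.Set.len]
  by_cases h3 : 3 ≤ PySem.Set.len S
  · rw [if_pos h3, if_pos (Or.inr h3)]
  · rw [if_neg h3]
    have hOmem : ∀ y, y ∈ O ↔ y ∈ S ∧ (y ≠ "base" ∧ y ≠ "people") := by
      intro y
      rw [hO, PySem.Set.mem_diff]
      constructor
      · rintro ⟨h1, h2⟩; refine ⟨h1, ?_, ?_⟩ <;> intro he <;> apply h2 <;> simp [he]
      · rintro ⟨h1, h2, h2'⟩; refine ⟨h1, ?_⟩; simp [PySem.Set.mem_ofList]; tauto
    have hOnd : O.Nodup := PySem.Set.nodup_diff _ _ (PySem.Set.nodup_ofList _)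
    -- the membership check succeeds on every port iff there is at most one "other" prefix
    have hkey : (∀ p ∈ ports, f p ∈
        (match ports.find? (fun p => decide (f p ≠ "base" ∧ f p ≠ "people")) with
          | some p => PySem.Set.add (PySem.Set.add (PySem.Set.add PySem.Set.empty "base") "people") (f p)
          | none => PySem.Set.add (PySem.Set.add PySem.Set.empty "base") "people"))
        ↔ ¬ (2 ≤ O.length) := by
      cases hfind : ports.find? (fun p => decide (f p ≠ "base" ∧ f p ≠ "people")) with
      | none =>
        have hnone := List.find?_eq_none.mp hfind
        have hOnil : O = [] := by
          rw [List.eq_nil_iff_forall_not_mem]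
          intro y hy
          rcases (hOmem y).mp hy with ⟨hyS, hy1, hy2⟩
          rcases List.mem_map.mp ((PySem.Set.mem_ofList _ _).mp hyS) with ⟨p, hp, rfl⟩
          exact hnone p hp (by simp [hy1, hy2])
        constructor
        · intro _; simp [hOnil]
        · intro _ p hp
          have := hnone p hp
          simp only [decide_eq_true_eq, not_and_or, not_not] at this
          rw [PySem.Set.mem_add, PySem.Set.mem_add]
          rcases this with h | h <;> tauto
      | some p0 =>
        have hp0 := List.find?_some hfind
        have hp0mem := List.mem_of_find?_eq_some hfind
        simp only [decide_eq_true_eq] at hp0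
        have hp0S : f p0 ∈ S := by
          rw [hS, PySem.Set.mem_ofList]; exact List.mem_map_of_mem hp0mem
        have hp0O : f p0 ∈ O := (hOmem _).mpr ⟨hp0S, hp0⟩
        have hopt : ∀ y, y ∈ PySem.Set.add (PySem.Set.add (PySem.Set.add PySem.Set.empty "base") "people") (f p0)
            ↔ (y = "base" ∨ y = "people" ∨ y = f p0) := by
          intro y
          rw [PySem.Set.mem_add, PySem.Set.mem_add, PySem.Set.mem_add]
          simp only [PySem.Set.empty, List.not_mem_nil, false_or]
          tauto
        rw [pvTwoMem hOnd hp0O]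
        constructor
        · intro hforall
          rintro ⟨b, hbO, hbne⟩
          rcases (hOmem b).mp hbO with ⟨hbS, hb1, hb2⟩
          rcases List.mem_map.mp ((PySem.Set.mem_ofList _ _).mp (hS ▸ hbS)) with ⟨p, hp, rfl⟩
          have := (hopt (f p)).mp (hforall p hp)
          tauto
        · intro hno p hp
          rw [hopt]
          by_cases hb : f p = "base"
          · exact Or.inl hb
          by_cases hpe : f p = "people"
          · exact Or.inr (Or.inl hpe)
          by_cases hpp : f p = f p0
          · exact Or.inr (Or.inr hpp)
          exact absurd ⟨f p,
            (hOmem _).mpr ⟨by rw [hS, PySem.Set.mem_ofList]; exact List.mem_map_of_mem hp, hb, hpe⟩,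
            hpp⟩ hno
    by_cases h2 : 2 ≤ PySem.Set.len O
    · rw [if_neg (fun hf => (hkey.mp hf) (hlenO.mp h2)), if_pos (Or.inl h2)]
    · rw [if_pos (hkey.mpr (fun hl => h2 (hlenO.mpr hl))), if_neg (fun hor => hor.elim h2 h3)]

theorem path_same_preffix_eq_alt (path : String) :
    path_same_preffix path = path_same_preffix_alt path := by
  unfold path_same_preffix path_same_preffix_alt
  dsimp only
  rw [← PySem.Set.update_map_eq_foldl_add, PySem.Set.update_empty,
    pvAddFirstOther_eq, pvCheckLoop_eq]
  exact pvCore pvPref ((PySem.Str.split? path "\t").getD [])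

-- ===== VERDICT (by name: the statement is the Claim_ definition above) =====
theorem path_same_preffix_spec : Claim_equal_path_same_preffix := by
  intro path _
  unfold Spec_path_same_preffix
  exact path_same_preffix_eq_alt path
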